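-- pv_equiv track=rewrite | github.com/Creative-Samurai1982/DiRTShowdown_Music_Manager | app/showdown_music_manager_windows.py_bkup.py | build_xml_wim_filters
-- ===== SOURCE A (Python) =====
-- from typing import Dict, List, Optional, Tuple, Any, Set
--
-- def wim_filename_from_stream_id(stream_id: str) -> str:
--     return f"{stream_id}.WIM"
--
-- def categorize_stream_id(stream_id: str) -> str:
--     s = stream_id.lower()
--     if "_fe_" in s:
--         return "FE"
--     if "_race_" in s:
--         return "RACE"
--     if "_replay_" in s:
--         return "REPLAY"
--     return "OTHER"
--
-- def build_xml_wim_filters(stream_ids: Set[str]) -> Dict[str, Set[str]]: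
--     """
--     Build sets of WIM filenames based on stream types.
--     Example output:
--       XML_RACE -> {"01_race_2ch.WIM", ...}
--     """
--     all_wims = {wim_filename_from_stream_id(s) for s in stream_ids}
--     fe = {wim_filename_from_stream_id(s) for s in stream_ids if categorize_stream_id(s) == "FE"}
--     race = {wim_filename_from_stream_id(s) for s in stream_ids if categorize_stream_id(s) == "RACE"}
--     replay = {wim_filename_from_stream_id(s) for s in stream_ids if categorize_stream_id(s) == "REPLAY"}
--     other = {wim_filename_from_stream_id(s) for s in stream_ids if categorize_stream_id(s) == "OTHER"}
--     return {
--         "XML_ALL": all_wims,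
--         "XML_FE": fe,
--         "XML_RACE": race,
--         "XML_REPLAY": replay,
--         "XML_OTHER": other
--     }
-- ===== SOURCE B (Python) =====
-- def wim_filename_from_stream_id(stream_id: str) -> str:
--     return f"{stream_id}.WIM"
--
-- def build_xml_wim_filters(stream_ids):
--     all_wims, fe, race, replay, other = set(), set(), set(), set(), set()
--     for s in stream_ids:
--         w = wim_filename_from_stream_id(s)
--         all_wims.add(w)
--         t = s.lower()
--         if "_fe_" in t:
--             fe.add(w)
--         elif "_race_" in t:
--             race.add(w)
--         elif "_replay_" in t:
--             replay.add(w)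
--         else:
--             other.add(w)
--     return {
--         "XML_ALL": all_wims,
--         "XML_FE": fe,
--         "XML_RACE": race,
--         "XML_REPLAY": replay,
--         "XML_OTHER": other
--     }
-- ===== Notes on version B (the rewrite author's own statement) =====
-- stated objective: faster
-- what changed: Replaces five separate comprehension scans (each re-lowering and re-categorizing every id) with a single dispatching pass that categorizes each id once and adds its WIM name to the matching set via an if/elif chain.
import Mathlib
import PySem

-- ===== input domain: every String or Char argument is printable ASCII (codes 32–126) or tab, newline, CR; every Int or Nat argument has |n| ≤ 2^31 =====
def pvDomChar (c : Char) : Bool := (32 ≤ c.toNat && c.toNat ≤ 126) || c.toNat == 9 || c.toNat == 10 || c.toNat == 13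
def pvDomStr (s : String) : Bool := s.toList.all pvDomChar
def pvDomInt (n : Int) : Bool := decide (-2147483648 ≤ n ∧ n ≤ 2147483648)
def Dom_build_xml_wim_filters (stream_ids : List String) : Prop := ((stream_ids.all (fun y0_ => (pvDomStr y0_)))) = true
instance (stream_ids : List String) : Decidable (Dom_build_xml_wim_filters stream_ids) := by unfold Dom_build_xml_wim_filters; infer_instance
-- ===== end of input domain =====

-- B replaces A's five separate comprehension scans with one dispatching pass (categorize once per id); equivalence of the returned dict is proved below.

-- ===== PORT A =====
def wim_filename_from_stream_id (stream_id : String) : String := stream_id ++ ".WIM"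

def categorize_stream_id (stream_id : String) : String :=
  let s := PySem.Str.lower stream_id
  if PySem.Str.isIn "_fe_" s then "FE"
  else if PySem.Str.isIn "_race_" s then "RACE"
  else if PySem.Str.isIn "_replay_" s then "REPLAY"
  else "OTHER"

def build_xml_wim_filters (stream_ids : List String) : List (String × List String) :=
  let all_wims := PySem.Set.ofList (stream_ids.map (fun s => wim_filename_from_stream_id s))
  let fe := PySem.Set.ofList ((stream_ids.filter (fun s => categorize_stream_id s == "FE")).map (fun s => wim_filename_from_stream_id s))
  let race := PySem.Set.ofList ((stream_ids.filter (fun s => categorize_stream_id s == "RACE")).map (fun s => wim_filename_from_stream_id s))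
  let replay := PySem.Set.ofList ((stream_ids.filter (fun s => categorize_stream_id s == "REPLAY")).map (fun s => wim_filename_from_stream_id s))
  let other := PySem.Set.ofList ((stream_ids.filter (fun s => categorize_stream_id s == "OTHER")).map (fun s => wim_filename_from_stream_id s))
  [("XML_ALL", all_wims), ("XML_FE", fe), ("XML_RACE", race), ("XML_REPLAY", replay), ("XML_OTHER", other)]

-- ===== PORT B =====
-- one loop over stream_ids, maintaining the five sets (all, fe, race, replay, other)
def pvStepB (acc : List String × List String × List String × List String × List String)
    (s : String) : List String × List String × List String × List String × List String :=
  let w := wim_filename_from_stream_id s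
  let allW := PySem.Set.add acc.1 w
  let t := PySem.Str.lower s
  if PySem.Str.isIn "_fe_" t then (allW, PySem.Set.add acc.2.1 w, acc.2.2.1, acc.2.2.2.1, acc.2.2.2.2)
  else if PySem.Str.isIn "_race_" t then (allW, acc.2.1, PySem.Set.add acc.2.2.1 w, acc.2.2.2.1, acc.2.2.2.2)
  else if PySem.Str.isIn "_replay_" t then (allW, acc.2.1, acc.2.2.1, PySem.Set.add acc.2.2.2.1 w, acc.2.2.2.2)
  else (allW, acc.2.1, acc.2.2.1, acc.2.2.2.1, PySem.Set.add acc.2.2.2.2 w)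

def build_xml_wim_filters_alt (stream_ids : List String) : List (String × List String) :=
  let acc := stream_ids.foldl pvStepB ([], [], [], [], [])
  [("XML_ALL", acc.1), ("XML_FE", acc.2.1), ("XML_RACE", acc.2.2.1),
   ("XML_REPLAY", acc.2.2.2.1), ("XML_OTHER", acc.2.2.2.2)]

-- ===== PRECONDITION & SPEC =====
def Spec_build_xml_wim_filters (stream_ids : List String) (out : List (String × List String)) : Prop := out = build_xml_wim_filters_alt stream_ids
instance (stream_ids : List String) (out : List (String × List String)) : Decidable (Spec_build_xml_wim_filters stream_ids out) := by unfold Spec_build_xml_wim_filters; infer_instance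

-- ===== CLAIM (what is proved, stated in full; the proofs are below) =====
def Claim_equal_build_xml_wim_filters : Prop := ∀ (stream_ids : List String), Dom_build_xml_wim_filters stream_ids → Spec_build_xml_wim_filters stream_ids (build_xml_wim_filters stream_ids)

-- ===== LEMMAS AND PROOFS =====

-- one comprehension of A, as a fold over the filtered list
def pvCatFold (cat : String) (xs : List String) (acc : List String) : List String :=
  (xs.filter (fun s => categorize_stream_id s == cat)).foldl
    (fun acc s => PySem.Set.add acc (wim_filename_from_stream_id s)) acc

theorem pvLoop_eq (xs : List String) (a f r p o : List String) :
    xs.foldl pvStepB (a, f, r, p, o) =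
      (xs.foldl (fun acc s => PySem.Set.add acc (wim_filename_from_stream_id s)) a,
       pvCatFold "FE" xs f, pvCatFold "RACE" xs r, pvCatFold "REPLAY" xs p, pvCatFold "OTHER" xs o) := by
  induction xs generalizing a f r p o with
  | nil => simp [pvCatFold]
  | cons s t ih =>
      by_cases h1 : PySem.Chars.isIn ['_', 'f', 'e', '_'] (PySem.Chars.lower s.toList) = true
      · simp [pvCatFold, categorize_stream_id, pvStepB, h1, ih]
      · by_cases h2 : PySem.Chars.isIn ['_', 'r', 'a', 'c', 'e', '_'] (PySem.Chars.lower s.toList) = true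
        · simp [pvCatFold, categorize_stream_id, pvStepB, h1, h2, ih]
        · by_cases h3 : PySem.Chars.isIn ['_', 'r', 'e', 'p', 'l', 'a', 'y', '_'] (PySem.Chars.lower s.toList) = true
          · simp [pvCatFold, categorize_stream_id, pvStepB, h1, h2, h3, ih]
          · simp [pvCatFold, categorize_stream_id, pvStepB, h1, h2, h3, ih]

theorem pvOfList_map_eq (g : String → String) (xs : List String) :
    PySem.Set.ofList (xs.map g) = xs.foldl (fun acc s => PySem.Set.add acc (g s)) [] := by
  rw [PySem.Set.ofList_eq_foldl, List.foldl_map]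

-- ===== VERDICT (by name: the statement is the Claim_ definition above) =====
theorem build_xml_wim_filters_spec : Claim_equal_build_xml_wim_filters := by
  intro xs _
  show build_xml_wim_filters xs = build_xml_wim_filters_alt xs
  simp only [build_xml_wim_filters, build_xml_wim_filters_alt, pvLoop_eq, pvCatFold,
    pvOfList_map_eq]
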